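-- pv_equiv track=rewrite | github.com/Elocinacademia/HumanSubjectLLM | download_all_pdfs.py | choose_best_pdf
-- ===== SOURCE A (Python) =====
-- from typing import Optional
--
-- def choose_best_pdf(candidates: list) -> Optional[str]:
--     if not candidates:
--         return None
--     bad_kw = ["supp", "supplement", "bibtex", "cite", "poster", "slides",
--               "ppt", "video", "code", "dataset", "appendix", "award", "presentation"]
--     def score(u):
--         return (sum(1 for k in bad_kw if k in u.lower()), len(u))
--     candidates = list(dict.fromkeys(candidates))
--     candidates.sort(key=score)
--     return candidates[0]
-- ===== SOURCE B (Python) =====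
-- from typing import Optional
--
-- def choose_best_pdf(candidates: list) -> Optional[str]:
--     bad_kw = ["supp", "supplement", "bibtex", "cite", "poster", "slides",
--               "ppt", "video", "code", "dataset", "appendix", "award", "presentation"]
--     best = None
--     best_score = None
--     for u in candidates:
--         s = (sum(1 for k in bad_kw if k in u.lower()), len(u))
--         if best is None or s < best_score:
--             best, best_score = u, s
--     return best
-- ===== Notes on version B (the rewrite author's own statement) =====
-- stated objective: simpler
-- what changed: Replaces dict.fromkeys dedup + stable sort + index-0 with a single running-minimum pass; strict tuple-< keeps the first occurrence of the minimal score, so deduplication is unnecessary.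
import Mathlib
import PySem

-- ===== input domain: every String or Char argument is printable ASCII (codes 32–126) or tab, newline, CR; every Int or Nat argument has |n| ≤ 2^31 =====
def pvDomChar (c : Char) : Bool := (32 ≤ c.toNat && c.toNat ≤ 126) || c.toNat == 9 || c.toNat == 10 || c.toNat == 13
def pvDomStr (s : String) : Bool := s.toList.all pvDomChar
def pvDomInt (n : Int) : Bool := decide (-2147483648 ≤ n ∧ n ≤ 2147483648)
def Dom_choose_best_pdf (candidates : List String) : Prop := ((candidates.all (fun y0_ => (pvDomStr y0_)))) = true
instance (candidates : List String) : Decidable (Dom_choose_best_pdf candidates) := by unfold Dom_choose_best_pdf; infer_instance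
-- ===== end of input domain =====

-- B replaces A's dedup + stable sort + take-first with a single running-minimum pass (strict tuple-< keeps the
-- first occurrence of the minimal score, making deduplication unnecessary); objective: simpler.

-- ===== PORT A =====
-- the bad-keyword list and the score key, shared verbatim by both Pythons
def pvBadKw : List String :=
  ["supp", "supplement", "bibtex", "cite", "poster", "slides",
   "ppt", "video", "code", "dataset", "appendix", "award", "presentation"]

-- score(u) = (sum(1 for k in bad_kw if k in u.lower()), len(u))
def pvScore (u : String) : Int × Int :=
  (pvBadKw.foldl (fun acc k => if PySem.Str.isIn k (PySem.Str.lower u) then acc + 1 else acc) (0 : Int),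
   PySem.Str.len u)

def choose_best_pdf (candidates : List String) : Option String :=
  if candidates = [] then none
  else
    let cs := PySem.List.dedup candidates
    PySem.List.pyGet?
      (PySem.List.sorted2 cs (fun u => (pvScore u).1) (fun u => (pvScore u).2)) 0

-- ===== PORT B =====
def choose_best_pdf_alt (candidates : List String) : Option String :=
  (candidates.foldl
      (fun best u =>
        let s := pvScore u
        match best with
        | none => some (u, s)
        | some (b, bs) =>
          if s.1 < bs.1 ∨ (s.1 = bs.1 ∧ s.2 < bs.2) then some (u, s) else some (b, bs))
      none).map Prod.fst

-- ===== PRECONDITION & SPEC =====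
def Spec_choose_best_pdf (candidates : List String) (out : Option String) : Prop := out = choose_best_pdf_alt candidates
instance (candidates : List String) (out : Option String) : Decidable (Spec_choose_best_pdf candidates out) := by unfold Spec_choose_best_pdf; infer_instance

-- ===== CLAIM (what is proved, stated in full; the proofs are below) =====
def Claim_equal_choose_best_pdf : Prop := ∀ (candidates : List String), Dom_choose_best_pdf candidates → Spec_choose_best_pdf candidates (choose_best_pdf candidates)

-- ===== LEMMAS AND PROOFS =====

-- the strict "comes-before" test of A's sort, specialised to the score key
def pvLt (u v : String) : Bool :=
  decide ((pvScore u).1 < (pvScore v).1) ||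
    (!decide ((pvScore v).1 < (pvScore u).1) && decide ((pvScore u).2 < (pvScore v).2))

-- the running-minimum step (first occurrence of the minimum wins)
def pvStep (o : Option String) (x : String) : Option String :=
  match o with
  | none => some x
  | some m => if pvLt x m then some x else some m

theorem pvLt_iff (u v : String) :
    pvLt u v = true ↔
      ((pvScore u).1 < (pvScore v).1 ∨ ((pvScore u).1 = (pvScore v).1 ∧ (pvScore u).2 < (pvScore v).2)) := by
  simp [pvLt]
  omega

theorem pvHead_insertBy (lt : String → String → Bool) (x : String) (ys : List String) :
    (PySem.List.insertBy lt x ys).head? =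
      some (match ys with | [] => x | y :: _ => if lt x y then x else y) := by
  cases ys with
  | nil => simp [PySem.List.insertBy]
  | cons y t =>
    by_cases h : lt x y = true <;> simp [PySem.List.insertBy, h]

theorem pvStep_head (acc : List String) (x : String) :
    (PySem.List.insertBy pvLt x acc).head? = pvStep acc.head? x := by
  rw [pvHead_insertBy]
  cases acc with
  | nil => rfl
  | cons y t =>
    show _ = pvStep (some y) x
    simp only [pvStep]
    split <;> rfl

theorem pvHead_foldl_insertBy (xs : List String) :
    ∀ (acc : List String),
      (List.foldl (fun a x => PySem.List.insertBy pvLt x a) acc xs).head? =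
        List.foldl pvStep acc.head? xs := by
  induction xs with
  | nil => intro acc; rfl
  | cons x xs ih =>
    intro acc
    simp only [List.foldl_cons]
    rw [ih (PySem.List.insertBy pvLt x acc), pvStep_head]

theorem pvFoldl_step_none (xs : List String) :
    ∀ (o : Option String), List.foldl pvStep o xs = none → xs = [] ∧ o = none := by
  induction xs with
  | nil => intro o h; exact ⟨rfl, h⟩
  | cons x xs ih =>
    intro o h
    rcases ih _ h with ⟨_, h2⟩
    cases o with
    | none => simp [pvStep] at h2
    | some m => simp only [pvStep] at h2; split at h2 <;> simp at h2

theorem pvFoldl_step_min (s : List String) :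
    ∀ (o : Option String) (m : String), List.foldl pvStep o s = some m →
      (∀ y ∈ s, pvLt y m = false) ∧ (∀ m0, o = some m0 → pvLt m0 m = false) := by
  induction s with
  | nil =>
    intro o m h
    exact ⟨by simp, fun m0 ho => by rw [ho] at h; cases h; rw [← Bool.not_eq_true, pvLt_iff]; omega⟩
  | cons x s ih =>
    intro o m h
    simp only [List.foldl_cons] at h
    rcases ih _ _ h with ⟨hall, hcar⟩
    cases o with
    | none =>
      have hx : pvLt x m = false := hcar x rfl
      refine ⟨fun y hy => ?_, fun m0 ho => by cases ho⟩
      rcases List.mem_cons.mp hy with rfl | hy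
      · exact hx
      · exact hall _ hy
    | some m0 =>
      by_cases hlt : pvLt x m0 = true
      · have hstep : pvStep (some m0) x = some x := by simp [pvStep, hlt]
        rw [hstep] at hcar
        have hx : pvLt x m = false := hcar x rfl
        have h1 : (pvScore x).1 < (pvScore m0).1 ∨
            ((pvScore x).1 = (pvScore m0).1 ∧ (pvScore x).2 < (pvScore m0).2) := (pvLt_iff x m0).mp hlt
        have h2 : ¬ ((pvScore x).1 < (pvScore m).1 ∨
            ((pvScore x).1 = (pvScore m).1 ∧ (pvScore x).2 < (pvScore m).2)) := by
          intro hc; rw [(pvLt_iff x m).mpr hc] at hx; cases hx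
        have hm0 : pvLt m0 m = false := by
          rw [← Bool.not_eq_true, pvLt_iff]; omega
        refine ⟨fun y hy => ?_, fun m1 ho => by cases ho; exact hm0⟩
        rcases List.mem_cons.mp hy with rfl | hy
        · exact hx
        · exact hall _ hy
      · have hlt' : pvLt x m0 = false := by simpa using hlt
        have hstep : pvStep (some m0) x = some m0 := by simp [pvStep, hlt']
        rw [hstep] at hcar
        have hm0 : pvLt m0 m = false := hcar m0 rfl
        have h1 : ¬ ((pvScore x).1 < (pvScore m0).1 ∨
            ((pvScore x).1 = (pvScore m0).1 ∧ (pvScore x).2 < (pvScore m0).2)) := by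
          intro hc; rw [(pvLt_iff x m0).mpr hc] at hlt'; cases hlt'
        have h2 : ¬ ((pvScore m0).1 < (pvScore m).1 ∨
            ((pvScore m0).1 = (pvScore m).1 ∧ (pvScore m0).2 < (pvScore m).2)) := by
          intro hc; rw [(pvLt_iff m0 m).mpr hc] at hm0; cases hm0
        have hx : pvLt x m = false := by
          rw [← Bool.not_eq_true, pvLt_iff]; omega
        refine ⟨fun y hy => ?_, fun m1 ho => by cases ho; exact hm0⟩
        rcases List.mem_cons.mp hy with rfl | hy
        · exact hx
        · exact hall _ hy

-- scanning the deduplicated list for the running minimum equals scanning the original list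
theorem pvDedup_min (xs : List String) :
    ∀ (s : List String),
      List.foldl pvStep none (List.foldl PySem.Set.add s xs) =
        List.foldl pvStep (List.foldl pvStep none s) xs := by
  induction xs with
  | nil => intro s; rfl
  | cons x xs ih =>
    intro s
    simp only [List.foldl_cons]
    by_cases hc : PySem.Set.contains s x = true
    · have hx : x ∈ s := by
        rw [show PySem.Set.contains s x = s.contains x from rfl, List.contains_iff_mem] at hc
        exact hc
      have hadd : PySem.Set.add s x = s := by simp [PySem.Set.add, hx]
      rw [hadd, ih s]
      cases ho : List.foldl pvStep none s with
      | none =>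
        rcases pvFoldl_step_none s none ho with ⟨hs, _⟩
        rw [hs] at hx; cases hx
      | some m =>
        have := (pvFoldl_step_min s none m ho).1 x hx
        simp [pvStep, this]
    · have hx : x ∉ s := by
        rw [show PySem.Set.contains s x = s.contains x from rfl, List.contains_iff_mem] at hc
        exact hc
      have hadd : PySem.Set.add s x = s ++ [x] := by simp [PySem.Set.add, hx]
      rw [hadd, ih (s ++ [x])]
      simp [List.foldl_append, pvStep]

-- B's fold (which caches the score alongside the element) projects to the plain running minimum
theorem pvAlt_foldl (xs : List String) :
    ∀ (o : Option String),
      List.foldl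
          (fun best u =>
            let s := pvScore u
            match best with
            | none => some (u, s)
            | some (b, bs) =>
              if s.1 < bs.1 ∨ (s.1 = bs.1 ∧ s.2 < bs.2) then some (u, s) else some (b, bs))
          (o.map (fun b => (b, pvScore b))) xs =
        (List.foldl pvStep o xs).map (fun b => (b, pvScore b)) := by
  induction xs with
  | nil => intro o; rfl
  | cons x xs ih =>
    intro o
    simp only [List.foldl_cons]
    cases o with
    | none =>
      have : (some (x, pvScore x) : Option (String × (Int × Int))) =
          (some x).map (fun b => (b, pvScore b)) := rfl
      rw [Option.map_none]
      show List.foldl _ (some (x, pvScore x)) xs = _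
      rw [this, ih (some x)]
      rfl
    | some b =>
      by_cases h : (pvScore x).1 < (pvScore b).1 ∨
          ((pvScore x).1 = (pvScore b).1 ∧ (pvScore x).2 < (pvScore b).2)
      · have hlt : pvLt x b = true := (pvLt_iff x b).mpr h
        have hstep : pvStep (some b) x = some x := by simp [pvStep, hlt]
        show List.foldl _ (if (pvScore x).1 < (pvScore b).1 ∨
            ((pvScore x).1 = (pvScore b).1 ∧ (pvScore x).2 < (pvScore b).2)
            then some (x, pvScore x) else some (b, pvScore b)) xs = _
        rw [if_pos h, hstep]
        have : (some (x, pvScore x) : Option (String × (Int × Int))) =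
            (some x).map (fun b => (b, pvScore b)) := rfl
        rw [this, ih (some x)]
      · have hlt : pvLt x b = false := by
          rw [← Bool.not_eq_true, pvLt_iff]; exact h
        have hstep : pvStep (some b) x = some b := by simp [pvStep, hlt]
        show List.foldl _ (if (pvScore x).1 < (pvScore b).1 ∨
            ((pvScore x).1 = (pvScore b).1 ∧ (pvScore x).2 < (pvScore b).2)
            then some (x, pvScore x) else some (b, pvScore b)) xs = _
        rw [if_neg h, hstep]
        have : (some (b, pvScore b) : Option (String × (Int × Int))) =
            (some b).map (fun b => (b, pvScore b)) := rfl
        rw [this, ih (some b)]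

theorem pvAlt_eq_min (xs : List String) :
    choose_best_pdf_alt xs = List.foldl pvStep none xs := by
  unfold choose_best_pdf_alt
  have h0 : (none : Option (String × (Int × Int))) =
      (none : Option String).map (fun b => (b, pvScore b)) := rfl
  rw [h0, pvAlt_foldl xs none, Option.map_map]
  cases List.foldl pvStep none xs <;> rfl

theorem pvSorted2_eq (cs : List String) :
    PySem.List.sorted2 cs (fun u => (pvScore u).1) (fun u => (pvScore u).2) =
      List.foldl (fun a x => PySem.List.insertBy pvLt x a) [] cs := rfl

-- ===== VERDICT (by name: the statement is the Claim_ definition above) =====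
theorem choose_best_pdf_spec : Claim_equal_choose_best_pdf := by
  intro candidates _
  unfold Spec_choose_best_pdf
  rw [pvAlt_eq_min]
  by_cases h : candidates = []
  · subst h; rfl
  · unfold choose_best_pdf
    rw [if_neg h]
    show PySem.List.pyGet? _ 0 = _
    rw [PySem.List.pyGet?_zero, ← List.head?_eq_getElem?, pvSorted2_eq,
      pvHead_foldl_insertBy]
    show List.foldl pvStep none (List.foldl PySem.Set.add [] candidates) = _
    rw [pvDedup_min candidates []]
    rfl
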